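-- pv_equiv track=rewrite | github.com/taicchoumsft/AoC2024 | day20/day20.py | savings
-- ===== SOURCE A (Python) =====
-- def savings(path, mp, allowed, target):
--     total = 0
--     for i, j in path:
--         for dir_i in range(-allowed, allowed + 1):
--             for dir_j in range(-allowed, allowed + 1):
--                 dist = abs(dir_i) + abs(dir_j)
--                 if dist > allowed: continue
--
--                 n_i, n_j = i + dir_i, j + dir_j
--                 if (n_i, n_j) in mp:
--                     if mp[(n_i, n_j)] - mp[(i, j)] - dist >= target:
--                         total += 1
--     return total
-- ===== SOURCE B (Python) =====
-- def savings(path, mp, allowed, target):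
--     items = list(mp.items())
--     return sum(
--         1
--         for i, j in path
--         for (ei, ej), v in items
--         if abs(ei - i) + abs(ej - j) <= allowed
--         and v - mp[(i, j)] - (abs(ei - i) + abs(ej - j)) >= target
--     )
-- ===== Notes on version B (the rewrite author's own statement) =====
-- stated objective: alternative
-- what changed: Instead of A's triple loop enumerating all coordinate offsets in the Manhattan diamond of radius `allowed` with an accumulator, B counts with a single flat comprehension over path x dict-entries, filtering each entry by its Manhattan distance to the path cell.
import Mathlib
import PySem

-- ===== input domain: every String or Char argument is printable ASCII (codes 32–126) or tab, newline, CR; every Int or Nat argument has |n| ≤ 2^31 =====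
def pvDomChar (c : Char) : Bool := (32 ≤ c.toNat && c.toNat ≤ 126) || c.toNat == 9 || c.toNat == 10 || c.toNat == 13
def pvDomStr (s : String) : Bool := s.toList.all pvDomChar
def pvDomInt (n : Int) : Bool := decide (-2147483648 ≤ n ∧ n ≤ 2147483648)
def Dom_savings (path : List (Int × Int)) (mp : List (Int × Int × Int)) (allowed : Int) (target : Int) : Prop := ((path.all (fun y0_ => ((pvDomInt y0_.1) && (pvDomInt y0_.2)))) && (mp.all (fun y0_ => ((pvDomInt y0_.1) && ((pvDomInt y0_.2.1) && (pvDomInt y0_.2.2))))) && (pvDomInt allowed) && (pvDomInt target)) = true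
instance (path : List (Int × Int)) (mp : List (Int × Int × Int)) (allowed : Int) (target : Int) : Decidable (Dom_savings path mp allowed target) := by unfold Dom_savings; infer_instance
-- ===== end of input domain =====

-- B replaces A's accumulator triple loop over the Manhattan-diamond offsets by a single flat
-- comprehension over path × dict entries, counted by filtering on Manhattan distance
-- (objective: alternative decomposition, same results).

-- ===== PORT A =====
-- The Python dict mp arrives as an association list; Dict.ofList reproduces dict(...) (later
-- duplicates overwrite in place).  mp[(i, j)] is ported as getD with default 0: Pre_savings
-- excludes exactly the inputs where that lookup raises KeyError in Python.
def savings (path : List (Int × Int)) (mp : List (Int × Int × Int)) (allowed : Int) (target : Int) : Int :=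
  let d : PySem.Dict (Int × Int) Int := PySem.Dict.ofList (mp.map (fun e => ((e.1, e.2.1), e.2.2)))
  path.foldl (fun total p =>
    (PySem.List.pyRange (-allowed) (allowed + 1) 1).foldl (fun total dir_i =>
      (PySem.List.pyRange (-allowed) (allowed + 1) 1).foldl (fun total dir_j =>
        let dist := |dir_i| + |dir_j|
        if dist > allowed then total
        else
          match d.get? (p.1 + dir_i, p.2 + dir_j) with
          | some vn => if vn - d.getD p 0 - dist ≥ target then total + 1 else total
          | none => total) total) total) 0

-- ===== PORT B =====
-- Source B counts with sum(1 for (i,j) in path for ((ei,ej),v) in items if …): ported as the length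
-- of the flattened, filtered product (each generator element contributes exactly 1).
def savings_alt (path : List (Int × Int)) (mp : List (Int × Int × Int)) (allowed : Int) (target : Int) : Int :=
  let d : PySem.Dict (Int × Int) Int := PySem.Dict.ofList (mp.map (fun e => ((e.1, e.2.1), e.2.2)))
  let items := d.items
  ((path.flatMap (fun p =>
      items.filter (fun kv =>
        decide (|kv.1.1 - p.1| + |kv.1.2 - p.2| ≤ allowed ∧
          kv.2 - d.getD p 0 - (|kv.1.1 - p.1| + |kv.1.2 - p.2|) ≥ target)))).length : Int)

-- ===== PRECONDITION & SPEC =====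
-- Pre_savings excludes exactly the inputs where the Python raises KeyError: a path cell that is
-- not a key of mp while some mp key lies within Manhattan distance `allowed` of it (both A and B
-- then evaluate mp[(i, j)] with a missing key).
def Pre_savings (path : List (Int × Int)) (mp : List (Int × Int × Int)) (allowed : Int) (target : Int) : Prop :=
  ∀ p ∈ path, (∃ e ∈ mp, (e.1, e.2.1) = p) ∨ (∀ e ∈ mp, allowed < |e.1 - p.1| + |e.2.1 - p.2|)
instance (path : List (Int × Int)) (mp : List (Int × Int × Int)) (allowed : Int) (target : Int) : Decidable (Pre_savings path mp allowed target) := by unfold Pre_savings; infer_instance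

def pvWitness_savings : (List (Int × Int)) × (List (Int × Int × Int)) × Int × Int :=
  ([(0, 0), (0, 1)], [(0, 0, 0), (0, 1, 1), (5, 5, 9)], 2, 1)

def Spec_savings (path : List (Int × Int)) (mp : List (Int × Int × Int)) (allowed : Int) (target : Int) (out : Int) : Prop := out = savings_alt path mp allowed target
instance (path : List (Int × Int)) (mp : List (Int × Int × Int)) (allowed : Int) (target : Int) (out : Int) : Decidable (Spec_savings path mp allowed target out) := by unfold Spec_savings; infer_instance

-- ===== CLAIM (what is proved, stated in full; the proofs are below) =====
def Claim_equal_savings : Prop := ∀ (path : List (Int × Int)) (mp : List (Int × Int × Int)) (allowed : Int) (target : Int), Dom_savings path mp allowed target → Pre_savings path mp allowed target → Spec_savings path mp allowed target (savings path mp allowed target)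

-- ===== LEMMAS AND PROOFS =====

-- A's test for a single offset (di, dj), as a Bool predicate.
def pvTestA (d : PySem.Dict (Int × Int) Int) (a t c : Int) (p : Int × Int) (di dj : Int) : Bool :=
  decide (|di| + |dj| ≤ a) &&
    ((d.get? (p.1 + di, p.2 + dj)).elim false (fun vn => decide (vn - c - (|di| + |dj|) ≥ t)))

-- B's test for a single dict entry, as a Bool predicate.
def pvTestB (a t c : Int) (p : Int × Int) (kv : (Int × Int) × Int) : Bool :=
  decide (|kv.1.1 - p.1| + |kv.1.2 - p.2| ≤ a ∧ kv.2 - c - (|kv.1.1 - p.1| + |kv.1.2 - p.2|) ≥ t)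

-- one-hot sum over a duplicate-free list
lemma pv_onehot (R : List Int) (hnd : R.Nodup) (y : Int) (C : Prop) [Decidable C] :
    (R.map (fun x => if x = y ∧ C then (1 : Int) else 0)).sum = if y ∈ R ∧ C then 1 else 0 := by
  induction R with
  | nil => simp
  | cons x xs ih =>
    rw [List.nodup_cons] at hnd
    simp only [List.map_cons, List.sum_cons, List.mem_cons, ih hnd.2]
    by_cases hC : C
    · by_cases hxy : x = y
      · subst hxy
        simp [hC, hnd.1]
      · have hyx : ¬y = x := fun h => hxy h.symm
        simp [hC, hyx, hxy]
    · simp [hC]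

-- adding one fresh entry in front of the dict adds exactly its own indicator
lemma pv_split (rest : List ((Int × Int) × Int)) (k : Int × Int) (v : Int) (a t c : Int)
    (p : Int × Int) (hk : k ∉ rest.map (fun e => e.1)) (di dj : Int) :
    (if pvTestA ⟨(k, v) :: rest⟩ a t c p di dj then (1 : Int) else 0)
      = (if pvTestA ⟨rest⟩ a t c p di dj then (1 : Int) else 0)
        + (if dj = k.2 - p.2 ∧ (di = k.1 - p.1 ∧ pvTestB a t c p (k, v) = true) then (1 : Int) else 0) := by
  by_cases hn : (p.1 + di, p.2 + dj) = k
  · have hdi : di = k.1 - p.1 := by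
      have := congrArg Prod.fst hn; simp at this; omega
    have hdj : dj = k.2 - p.2 := by
      have := congrArg Prod.snd hn; simp at this; omega
    subst hdi; subst hdj
    have hrest : (PySem.Dict.mk rest).get? (p.1 + (k.1 - p.1), p.2 + (k.2 - p.2)) = none := by
      rw [PySem.Dict.get?_eq_none_iff_not_mem_keys, PySem.Dict.keys_mk]
      rw [show (p.1 + (k.1 - p.1), p.2 + (k.2 - p.2)) = k from hn]
      exact hk
    have hbeq : (k == (p.1 + (k.1 - p.1), p.2 + (k.2 - p.2))) = true := by
      rw [beq_iff_eq]; exact hn.symm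
    simp only [pvTestA, pvTestB, PySem.Dict.get?_mk_cons, hrest, hbeq, if_true, Option.elim,
      Bool.and_false]
    have h1 : p.1 + (k.1 - p.1) - p.1 = k.1 - p.1 := by ring
    have h2 : p.2 + (k.2 - p.2) - p.2 = k.2 - p.2 := by ring
    simp only [Bool.and_eq_true, decide_eq_true_eq]
    split_ifs with hA hB hB <;> simp_all
  · have hbeq : (k == (p.1 + di, p.2 + dj)) = false := by
      rw [beq_eq_false_iff_ne]; exact fun h => hn h.symm
    have hno : ¬(dj = k.2 - p.2 ∧ (di = k.1 - p.1 ∧ pvTestB a t c p (k, v) = true)) := by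
      rintro ⟨h1, h2, -⟩
      exact hn (by rw [Prod.mk.injEq]; omega)
    simp only [pvTestA, PySem.Dict.get?_mk_cons, hbeq, Bool.false_eq_true, if_false,
      if_neg hno, add_zero]
    rfl

-- the core counting identity: the diamond enumeration counts exactly the dict entries
lemma pv_core (a t c : Int) (p : Int × Int) :
    ∀ (l : List ((Int × Int) × Int)), (l.map (fun e => e.1)).Nodup →
      ((PySem.List.pyRange (-a) (a + 1) 1).map (fun di =>
        ((PySem.List.pyRange (-a) (a + 1) 1).map (fun dj =>
          if pvTestA ⟨l⟩ a t c p di dj then (1 : Int) else 0)).sum)).sum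
      = (l.countP (pvTestB a t c p) : Int) := by
  intro l
  induction l with
  | nil =>
    intro _
    have hA : ∀ di dj, pvTestA (⟨[]⟩ : PySem.Dict (Int × Int) Int) a t c p di dj = false := by
      intro di dj
      simp [pvTestA, show (PySem.Dict.mk ([] : List ((Int × Int) × Int))).get?
        (p.1 + di, p.2 + dj) = none from rfl]
    simp [hA]
  | cons kv rest ih =>
    intro hnd
    obtain ⟨k, v⟩ := kv
    rw [List.map_cons, List.nodup_cons] at hnd
    have hndR := PySem.List.nodup_pyRange_one (-a) (a + 1)
    have hmain : ∀ di : Int,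
        ((PySem.List.pyRange (-a) (a + 1) 1).map (fun dj =>
          if pvTestA ⟨(k, v) :: rest⟩ a t c p di dj then (1 : Int) else 0)).sum
        = ((PySem.List.pyRange (-a) (a + 1) 1).map (fun dj =>
            if pvTestA ⟨rest⟩ a t c p di dj then (1 : Int) else 0)).sum
          + (if di = k.1 - p.1 ∧ ((k.2 - p.2) ∈ PySem.List.pyRange (-a) (a + 1) 1
              ∧ pvTestB a t c p (k, v) = true) then (1 : Int) else 0) := by
      intro di
      rw [List.map_congr_left (fun dj _ => pv_split rest k v a t c p hnd.1 di dj),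
        PySem.List.sum_map_add_int,
        pv_onehot _ hndR (k.2 - p.2) (di = k.1 - p.1 ∧ pvTestB a t c p (k, v) = true)]
      congr 1
      apply if_congr _ rfl rfl
      tauto
    rw [List.map_congr_left (fun di _ => hmain di), PySem.List.sum_map_add_int, ih hnd.2,
      pv_onehot _ hndR (k.1 - p.1) _]
    by_cases hB : pvTestB a t c p (k, v) = true
    · have hd : |k.1 - p.1| + |k.2 - p.2| ≤ a := by
        have := hB; simp only [pvTestB, decide_eq_true_eq] at this; exact this.1
      have hm1 : (k.1 - p.1) ∈ PySem.List.pyRange (-a) (a + 1) 1 := by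
        rw [PySem.List.mem_pyRange_one]
        have := abs_nonneg (k.2 - p.2)
        have := le_abs_self (k.1 - p.1)
        have := neg_abs_le (k.1 - p.1)
        omega
      have hm2 : (k.2 - p.2) ∈ PySem.List.pyRange (-a) (a + 1) 1 := by
        rw [PySem.List.mem_pyRange_one]
        have := abs_nonneg (k.1 - p.1)
        have := le_abs_self (k.2 - p.2)
        have := neg_abs_le (k.2 - p.2)
        omega
      simp [hB, hm1, hm2]
    · simp [hB]

-- a foldl accumulating per-element counts equals the length of the flattened filtered product
lemma pv_flat (g : (Int × Int) → List ((Int × Int) × Int)) :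
    ∀ (l : List (Int × Int)) (acc : Int),
      l.foldl (fun acc p => acc + ((g p).length : Int)) acc = acc + ((l.flatMap g).length : Int) := by
  intro l
  induction l with
  | nil => intro acc; simp
  | cons x xs ih =>
    intro acc
    simp only [List.foldl_cons, ih, List.flatMap_cons, List.length_append]
    push_cast
    ring

-- ===== VERDICT (by name: the statement is the Claim_ definition above) =====
set_option maxHeartbeats 1000000 in
theorem savings_spec : Claim_equal_savings := by
  intro path mp allowed target _ _
  unfold Spec_savings savings savings_alt
  set d : PySem.Dict (Int × Int) Int :=
    PySem.Dict.ofList (mp.map (fun e => ((e.1, e.2.1), e.2.2))) with hd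
  have hndk : (d.items.map (fun e => e.1)).Nodup := by
    have := PySem.Dict.nodup_keys_ofList (mp.map (fun e => ((e.1, e.2.1), e.2.2)))
    simpa [PySem.Dict.keys, hd] using this
  -- A's per-cell triple loop adds exactly the count of matching dict entries
  have hcell : ∀ (acc : Int) (p : Int × Int),
      (PySem.List.pyRange (-allowed) (allowed + 1) 1).foldl (fun total dir_i =>
        (PySem.List.pyRange (-allowed) (allowed + 1) 1).foldl (fun total dir_j =>
          let dist := |dir_i| + |dir_j|
          if dist > allowed then total
          else
            match d.get? (p.1 + dir_i, p.2 + dir_j) with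
            | some vn => if vn - d.getD p 0 - dist ≥ target then total + 1 else total
            | none => total) total) acc
      = acc + ((d.items.filter (pvTestB allowed target (d.getD p 0) p)).length : Int) := by
    intro acc p
    set c : Int := d.getD p 0 with hc
    have hshape : ∀ (acc di dj : Int),
        (let dist := |di| + |dj|
         if dist > allowed then acc
         else
           match d.get? (p.1 + di, p.2 + dj) with
           | some vn => if vn - c - dist ≥ target then acc + 1 else acc
           | none => acc)
        = if pvTestA d allowed target c p di dj then acc + 1 else acc := by
      intro acc di dj
      by_cases h1 : |di| + |dj| ≤ allowed
      · cases h2 : d.get? (p.1 + di, p.2 + dj) with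
        | none => simp [pvTestA, h2, not_lt.mpr h1]
        | some vn =>
          by_cases h3 : vn - c - (|di| + |dj|) ≥ target
          · simp [pvTestA, h2, not_lt.mpr h1, h1, h3]
          · simp [pvTestA, h2, not_lt.mpr h1, h1, h3]
      · simp [pvTestA, not_le.mp h1, h1]
    have hinner : ∀ (acc di : Int),
        (PySem.List.pyRange (-allowed) (allowed + 1) 1).foldl (fun total dj =>
          let dist := |di| + |dj|
          if dist > allowed then total
          else
            match d.get? (p.1 + di, p.2 + dj) with
            | some vn => if vn - c - dist ≥ target then total + 1 else total
            | none => total) acc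
        = acc + ((PySem.List.pyRange (-allowed) (allowed + 1) 1).map (fun dj =>
            if pvTestA d allowed target c p di dj then (1 : Int) else 0)).sum := by
      intro acc di
      rw [PySem.List.foldl_congr_mem _ _
        (fun acc dj => if pvTestA d allowed target c p di dj then acc + 1 else acc) _
        (fun acc dj _ => hshape acc di dj),
        PySem.List.foldl_if_add_one, PySem.List.sum_map_ite_one_zero]
    rw [PySem.List.foldl_congr_mem _ _
        (fun acc di => acc + ((PySem.List.pyRange (-allowed) (allowed + 1) 1).map (fun dj =>
          if pvTestA d allowed target c p di dj then (1 : Int) else 0)).sum) _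
        (fun acc di _ => hinner acc di),
      PySem.List.foldl_add, pv_core allowed target c p d.items hndk,
      List.countP_eq_length_filter]
  rw [PySem.List.foldl_congr_mem _ _
      (fun acc p => acc + ((d.items.filter (pvTestB allowed target (d.getD p 0) p)).length : Int)) _
      (fun acc p _ => hcell acc p),
    pv_flat (fun p => d.items.filter (pvTestB allowed target (d.getD p 0) p)), zero_add]
  rfl
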